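-- pv_equiv track=rewrite | github.com/VDanielL/AREP | Code/DataTypeClassification/periodogram.py | aperiodic_beg
-- ===== SOURCE A (Python) =====
-- def aperiodic_beg(data, maxindex):
--     a_beg = False
--     max_val = max(data)
--     for i in range(maxindex):
--         a_beg = data[i] == max_val
--         if a_beg:
--             break
--     return a_beg
-- ===== SOURCE B (Python) =====
-- def aperiodic_beg(data, maxindex):
--     overall = max(data)
--     if maxindex <= 0:
--         return False
--     return max(data[:maxindex]) == overall
-- ===== Notes on version B (the rewrite author's own statement) =====
-- stated objective: simpler
-- what changed: Replaces the index loop that scans for the first occurrence of the maximum with two max reductions: the global max and the prefix max, compared for equality.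
import Mathlib
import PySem

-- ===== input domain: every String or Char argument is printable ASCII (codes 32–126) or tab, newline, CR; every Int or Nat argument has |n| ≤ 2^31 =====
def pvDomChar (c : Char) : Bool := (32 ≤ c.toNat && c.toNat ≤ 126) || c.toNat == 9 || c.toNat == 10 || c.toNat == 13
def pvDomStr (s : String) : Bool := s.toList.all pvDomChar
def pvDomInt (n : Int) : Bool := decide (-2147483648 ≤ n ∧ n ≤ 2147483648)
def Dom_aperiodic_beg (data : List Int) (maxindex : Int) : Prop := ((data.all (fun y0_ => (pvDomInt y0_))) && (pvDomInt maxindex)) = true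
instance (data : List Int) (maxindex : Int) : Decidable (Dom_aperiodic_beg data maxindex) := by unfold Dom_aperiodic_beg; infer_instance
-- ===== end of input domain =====

-- B replaces A's first-occurrence index scan over range(maxindex) by comparing max(data[:maxindex]) with max(data); simpler, same cost.


-- ===== PORT A =====
-- the loop 'for i in range(maxindex): a_beg = data[i] == max_val; if a_beg: break'.
-- On an out-of-range index Python raises IndexError; that never happens on Pre_
-- (data ≠ []) because the max is always found at an index < len(data) first;
-- the port returns false on that unreachable branch.
def pvALoop (data : List Int) (maxv : Int) (ab : Bool) : List Int → Bool
  | [] => ab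
  | i :: rest =>
      match PySem.List.pyGet? data i with
      | none => false
      | some v => if v == maxv then true else pvALoop data maxv false rest

def aperiodic_beg (data : List Int) (maxindex : Int) : Bool :=
  match PySem.List.max? data (fun x => x) with
  | none => false      -- max([]) raises ValueError; excluded by Pre_
  | some maxv => pvALoop data maxv false (PySem.List.pyRange 0 maxindex 1)

-- ===== PORT B =====
def aperiodic_beg_alt (data : List Int) (maxindex : Int) : Bool :=
  match PySem.List.max? data (fun x => x) with
  | none => false      -- max([]) raises ValueError; excluded by Pre_
  | some overall =>
    if maxindex ≤ 0 then false
    else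
      match PySem.List.max? (PySem.List.slice data none (some maxindex)) (fun x => x) with
      | none => false  -- unreachable: the prefix is nonempty when data ≠ [] and maxindex > 0
      | some pm => pm == overall

-- ===== PRECONDITION & SPEC =====
-- Pre_ excludes exactly the empty list, on which Python's max(data) raises ValueError in both A and B.
def Pre_aperiodic_beg (data : List Int) (maxindex : Int) : Prop := data ≠ []
instance (data : List Int) (maxindex : Int) : Decidable (Pre_aperiodic_beg data maxindex) := by unfold Pre_aperiodic_beg; infer_instance
def pvWitness_aperiodic_beg : List Int × Int := ([3, 1, 2], 2)

def Spec_aperiodic_beg (data : List Int) (maxindex : Int) (out : Bool) : Prop := out = aperiodic_beg_alt data maxindex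
instance (data : List Int) (maxindex : Int) (out : Bool) : Decidable (Spec_aperiodic_beg data maxindex out) := by unfold Spec_aperiodic_beg; infer_instance

-- ===== CLAIM (what is proved, stated in full; the proofs are below) =====
def Claim_equal_aperiodic_beg : Prop := ∀ (data : List Int) (maxindex : Int), Dom_aperiodic_beg data maxindex → Pre_aperiodic_beg data maxindex → Spec_aperiodic_beg data maxindex (aperiodic_beg data maxindex)

-- ===== LEMMAS AND PROOFS =====

-- A's loop over range(a, n) decides membership of the max value in the window data[a:n].
theorem pvALoop_eq (data : List Int) (m : Int) (n : Int) :
    ∀ (a : Int), 0 ≤ a →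
      pvALoop data m false (PySem.List.pyRange a n 1) =
        decide (m ∈ (data.drop a.toNat).take (n - a).toNat) := by
  intro a ha
  generalize hk : (n - a).toNat = k
  induction k generalizing a with
  | zero =>
      rw [PySem.List.pyRange_one_eq_nil (by omega)]
      simp [pvALoop]
  | succ k ih =>
      have halt : a < n := by omega
      rw [PySem.List.pyRange_one_cons halt]
      simp only [pvALoop]
      rw [PySem.List.pyGet?_of_nonneg data ha]
      have h0 : (data.drop a.toNat)[0]? = data[a.toNat]? := by simp
      rcases hd : data.drop a.toNat with _ | ⟨x, t⟩
      · rw [hd] at h0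
        simp only [← h0]
        simp
      · rw [hd] at h0
        rw [← h0]
        simp only [List.getElem?_cons_zero]
        have ht : data.drop (a + 1).toNat = t := by
          have h1 : (a + 1).toNat = a.toNat + 1 := by omega
          rw [h1, ← List.drop_drop, hd]
          simp
        by_cases hxm : x = m
        · simp [hxm, List.take_succ_cons]
        · have hbeq : (x == m) = false := by simp [hxm]
          simp only [hbeq, Bool.false_eq_true, if_false]
          rw [ih (a + 1) (by omega) (by omega), ht]
          simp [List.take_succ_cons, Ne.symm hxm]

theorem aperiodic_beg_spec : Claim_equal_aperiodic_beg := by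
  intro data maxindex _ hne
  unfold Spec_aperiodic_beg aperiodic_beg aperiodic_beg_alt
  cases hm : PySem.List.max? data (fun x => x) with
  | none => rfl
  | some m =>
    dsimp only
    have hmax : ∀ y ∈ data, y ≤ m := by
      intro y hy; exact PySem.List.max?_isMax hm y hy
    rw [pvALoop_eq data m maxindex 0 le_rfl]
    simp only [Int.toNat_zero, List.drop_zero, sub_zero]
    by_cases hle : maxindex ≤ 0
    · simp [hle, show maxindex.toNat = 0 by omega]
    · simp only [hle, if_false]
      rw [PySem.List.slice_to data (by omega)]
      rcases hp : PySem.List.max? (data.take maxindex.toNat) (fun x => x) with _ | pm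
      · rw [PySem.List.max?_eq_none_iff] at hp
        rcases data with _ | ⟨d, ds⟩
        · exact absurd rfl hne
        · have : maxindex.toNat = 0 := by
            by_contra h
            rw [show maxindex.toNat = (maxindex.toNat - 1) + 1 by omega] at hp
            simp [List.take_succ_cons] at hp
          omega
      · have hpmem : pm ∈ data.take maxindex.toNat := PySem.List.max?_mem hp
        have hpmax : ∀ y ∈ data.take maxindex.toNat, y ≤ pm := by
          intro y hy; exact PySem.List.max?_isMax hp y hy
        have hpm_le : pm ≤ m := hmax pm (List.mem_of_mem_take hpmem)
        by_cases hmp : m ∈ data.take maxindex.toNat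
        · have : pm = m := le_antisymm hpm_le (hpmax m hmp)
          simp [hmp, this]
        · have : pm ≠ m := by rintro rfl; exact hmp hpmem
          simp [hmp, this]
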